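-- pv_equiv track=rewrite | github.com/AffineFoundation/affine-whitepaper-docs | scripts/ingest-deepwiki.py | _wrap_tables
-- ===== SOURCE A (Python) =====
-- def _wrap_tables(md):
--     lines = md.split("\n")
--     result = []
--     in_table = False
--     for line in lines:
--         is_table = line.strip().startswith("|")
--         if is_table and not in_table:
--             in_table = True
--             result.append("<Table>")
--             result.append("")
--         elif not is_table and in_table:
--             in_table = False
--             result.append("")
--             result.append("</Table>")
--             result.append("")
--         result.append(line)
--     if in_table:
--         result.append("")
--         result.append("</Table>")
--     return "\n".join(result)
-- ===== SOURCE B (Python) =====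
-- def _wrap_tables(md):
--     lines = md.split("\n")
--
--     def is_table(l):
--         return l.strip().startswith("|")
--
--     out = []
--     i = 0
--     n = len(lines)
--     while i < n:
--         if is_table(lines[i]):
--             j = i
--             while j < n and is_table(lines[j]):
--                 j += 1
--             out += ["<Table>", ""] + lines[i:j] + ["", "</Table>"]
--             if j < n:
--                 out.append("")
--             i = j
--         else:
--             j = i
--             while j < n and not is_table(lines[j]):
--                 j += 1
--             out += lines[i:j]
--             i = j
--     return "\n".join(out)
-- ===== Notes on version B (the rewrite author's own statement) =====
-- stated objective: alternative
-- what changed: Replaced A's line-by-line state machine with an in_table flag by a run-based pass that peels maximal runs of table/non-table lines and emits each whole block (with the trailing blank only when a table run is not last).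
import Mathlib
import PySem

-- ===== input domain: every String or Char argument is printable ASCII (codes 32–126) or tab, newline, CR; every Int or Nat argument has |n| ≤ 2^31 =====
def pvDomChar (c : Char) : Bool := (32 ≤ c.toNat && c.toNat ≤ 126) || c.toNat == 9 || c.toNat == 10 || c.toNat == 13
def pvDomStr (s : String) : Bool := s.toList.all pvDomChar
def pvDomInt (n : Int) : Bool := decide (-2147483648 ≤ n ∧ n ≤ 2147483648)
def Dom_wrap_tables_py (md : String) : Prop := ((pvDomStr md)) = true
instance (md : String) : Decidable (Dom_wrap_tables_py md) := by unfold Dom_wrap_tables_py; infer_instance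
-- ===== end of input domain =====

-- B replaces A's line-by-line in_table flag machine by a run-based pass over maximal
-- table / non-table blocks (objective: alternative decomposition, same cost).

-- is_table: line.strip().startswith("|")
def wtIsTable (l : String) : Bool := PySem.Str.startswith (PySem.Str.strip l) "|"

-- ===== PORT A =====
-- the for-loop with accumulator `result` and flag `in_table`
def wtLoopA : List String → List String → Bool → List String × Bool
  | [], res, it => (res, it)
  | l :: ls, res, it =>
    let is_t := wtIsTable l
    if is_t && !it then wtLoopA ls (res ++ ["<Table>", "", l]) true
    else if !is_t && it then wtLoopA ls (res ++ ["", "</Table>", "", l]) false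
    else wtLoopA ls (res ++ [l]) it

def wrap_tables_py (md : String) : String :=
  let lines := (PySem.Str.split? md "\n").getD []
  let p := wtLoopA lines [] false
  PySem.Str.join "\n" (if p.2 then p.1 ++ ["", "</Table>"] else p.1)

-- ===== PORT B =====
-- run-based pass: peel the maximal run at the head, emit, recurse on the rest
def wtGo : List String → List String
  | [] => []
  | l :: ls =>
    if wtIsTable l then
      let tbl := (l :: ls).takeWhile wtIsTable
      let rest := (l :: ls).dropWhile wtIsTable
      ["<Table>", ""] ++ tbl ++ ["", "</Table>"] ++ (if rest.isEmpty then [] else [""]) ++ wtGo rest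
    else
      (l :: ls).takeWhile (fun x => !wtIsTable x) ++ wtGo ((l :: ls).dropWhile (fun x => !wtIsTable x))
  termination_by ls => ls.length
  decreasing_by
  · simp_all [List.dropWhile]
    exact List.length_dropWhile_le _ _
  · simp_all [List.dropWhile]
    exact List.length_dropWhile_le _ _

def wrap_tables_py_alt (md : String) : String :=
  PySem.Str.join "\n" (wtGo ((PySem.Str.split? md "\n").getD []))

-- ===== PRECONDITION & SPEC =====
def Spec_wrap_tables_py (md : String) (out : String) : Prop := out = wrap_tables_py_alt md
instance (md : String) (out : String) : Decidable (Spec_wrap_tables_py md out) := by unfold Spec_wrap_tables_py; infer_instance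

-- ===== CLAIM (what is proved, stated in full; the proofs are below) =====
def Claim_equal_wrap_tables_py : Prop := ∀ (md : String), Dom_wrap_tables_py md → Spec_wrap_tables_py md (wrap_tables_py md)

-- ===== LEMMAS AND PROOFS =====

-- proof-side, accumulator-free form of A's loop (final close folded in)
def wtF : List String → Bool → List String
  | [], it => if it then ["", "</Table>"] else []
  | l :: ls, it =>
    if wtIsTable l then
      (if it then l :: wtF ls true else ["<Table>", "", l] ++ wtF ls true)
    else
      (if it then ["", "</Table>", "", l] ++ wtF ls false else l :: wtF ls false)

theorem wtLoopA_eq_wtF (ls : List String) : ∀ (res : List String) (it : Bool),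
    (if (wtLoopA ls res it).2 then (wtLoopA ls res it).1 ++ ["", "</Table>"]
     else (wtLoopA ls res it).1) = res ++ wtF ls it := by
  induction ls with
  | nil => intro res it; cases it <;> simp [wtLoopA, wtF]
  | cons l ls ih =>
    intro res it
    cases h : wtIsTable l <;> cases it <;>
      simp [wtLoopA, wtF, h, ih]

theorem wtGo_cons_nontable (l : String) (ls : List String) (h : wtIsTable l = false) :
    wtGo (l :: ls) = l :: wtGo ls := by
  rw [wtGo]
  simp only [h, Bool.false_eq_true, if_false]
  cases ls with
  | nil => simp [wtGo, List.takeWhile, List.dropWhile, h]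
  | cons m ms =>
    cases hm : wtIsTable m
    · conv_rhs => rw [wtGo]
      simp [List.takeWhile, List.dropWhile, h, hm]
    · simp [List.takeWhile, List.dropWhile, h, hm]

theorem wtF_eq_wtGo (ls : List String) :
    wtF ls false = wtGo ls ∧
    wtF ls true = ls.takeWhile wtIsTable ++ ["", "</Table>"] ++
      (if (ls.dropWhile wtIsTable).isEmpty then []
       else "" :: wtGo (ls.dropWhile wtIsTable)) := by
  induction ls with
  | nil => simp [wtF, wtGo]
  | cons l ls ih =>
    cases h : wtIsTable l
    · constructor
      · rw [wtF]
        simp only [h, Bool.false_eq_true, if_false]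
        rw [ih.1, wtGo_cons_nontable l ls h]
      · rw [wtF]
        simp only [h, Bool.false_eq_true, if_false, if_true]
        rw [ih.1]
        simp [List.takeWhile, List.dropWhile, h, wtGo_cons_nontable l ls h]
    · constructor
      · rw [wtF]
        simp only [h, if_true, Bool.false_eq_true, if_false]
        rw [ih.2, wtGo]
        simp only [h, if_true, List.takeWhile, List.dropWhile]
        cases hd : (ls.dropWhile wtIsTable).isEmpty
        · simp
        · have : ls.dropWhile wtIsTable = [] := List.isEmpty_iff.mp hd
          simp [this, wtGo]
      · rw [wtF]
        simp only [h, if_true]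
        rw [ih.2]
        simp [List.takeWhile, List.dropWhile, h]

-- ===== VERDICT (by name: the statement is the Claim_ definition above) =====
theorem wrap_tables_py_spec : Claim_equal_wrap_tables_py := by
  intro md _
  unfold Spec_wrap_tables_py wrap_tables_py wrap_tables_py_alt
  have h := wtLoopA_eq_wtF ((PySem.Str.split? md "\n").getD []) [] false
  simp only [List.nil_append] at h
  exact congrArg (PySem.Str.join "\n") (h.trans (wtF_eq_wtGo _).1)
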